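-- pv_equiv track=rewrite | github.com/kiwiicam/ai2 | Minimax.py | check_two_in_a_row
-- ===== SOURCE A (Python) =====
-- def check_two_in_a_row(board, player):
--     # Check rows
--     for row in range(3):
--         if (board[row][0] == board[row][1] == player and board[row][2] == 0) or \
--            (board[row][0] == board[row][2] == player and board[row][1] == 0) or \
--            (board[row][1] == board[row][2] == player and board[row][0] == 0):
--             return True
--
--     # Check columns
--     for col in range(3):
--         if (board[0][col] == board[1][col] == player and board[2][col] == 0) or \
--            (board[0][col] == board[2][col] == player and board[1][col] == 0) or \
--            (board[1][col] == board[2][col] == player and board[0][col] == 0):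
--             return True
--
--     # Check diagonals
--     if (board[0][0] == board[1][1] == player and board[2][2] == 0) or \
--        (board[0][0] == board[2][2] == player and board[1][1] == 0) or \
--        (board[1][1] == board[2][2] == player and board[0][0] == 0):
--         return True
--
--     if (board[0][2] == board[1][1] == player and board[2][0] == 0) or \
--        (board[0][2] == board[2][0] == player and board[1][1] == 0) or \
--        (board[1][1] == board[2][0] == player and board[0][2] == 0):
--         return True
--
--     return False
-- ===== SOURCE B (Python) =====
-- def check_two_in_a_row(board, player):
--     # cell-centric scan: for each EMPTY cell, test whether the player occupies
--     # the other two cells of the row / column / diagonal through it,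
--     # addressed with rotational (i+1)%3, (i+2)%3 arithmetic
--     for r in range(3):
--         for c in range(3):
--             if board[r][c] != 0:
--                 continue
--             if board[r][(c + 1) % 3] == player and board[r][(c + 2) % 3] == player:
--                 return True
--             if board[(r + 1) % 3][c] == player and board[(r + 2) % 3][c] == player:
--                 return True
--             if r == c and board[(r + 1) % 3][(c + 1) % 3] == player and board[(r + 2) % 3][(c + 2) % 3] == player:
--                 return True
--             if r + c == 2 and board[(r + 1) % 3][(c + 2) % 3] == player and board[(r + 2) % 3][(c + 1) % 3] == player:
--                 return True
--     return False
-- ===== Notes on version B (the rewrite author's own statement) =====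
-- stated objective: alternative
-- what changed: Replaces A's line-centric scan (8 winning lines, each tested with three hand-written two-plus-empty patterns) with a cell-centric scan: iterate over the 9 cells, and for each EMPTY cell test whether the player holds the other two cells of its row, column and (when on one) diagonal, addressed by (i+1)%3/(i+2)%3 rotation instead of a pattern table.
-- outside the precondition, e.g. on check_two_in_a_row([[0, 5, 5], [1, 0, 1]], 1): A returns True, B raises IndexError
import Mathlib
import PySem

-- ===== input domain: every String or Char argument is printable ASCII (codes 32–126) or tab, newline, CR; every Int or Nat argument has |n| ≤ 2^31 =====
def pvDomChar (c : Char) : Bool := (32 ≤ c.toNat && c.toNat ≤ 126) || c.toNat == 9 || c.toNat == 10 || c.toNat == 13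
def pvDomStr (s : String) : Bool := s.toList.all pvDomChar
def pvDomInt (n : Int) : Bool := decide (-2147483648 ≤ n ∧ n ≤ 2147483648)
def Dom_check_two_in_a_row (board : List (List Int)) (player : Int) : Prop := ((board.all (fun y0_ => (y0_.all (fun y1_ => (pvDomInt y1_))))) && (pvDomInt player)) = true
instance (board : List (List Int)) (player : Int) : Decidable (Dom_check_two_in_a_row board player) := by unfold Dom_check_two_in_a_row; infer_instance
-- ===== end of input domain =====

-- B replaces A's line-centric pattern match (8 winning lines, each tested three ways) with a
-- cell-centric scan: for each EMPTY cell, check whether the player holds the other two cells of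
-- the row / column / diagonal through it, addressed with (i+1)%3, (i+2)%3 arithmetic (objective: alternative).

-- board[r][c]; Pre_ guarantees every access is in range, so the getD defaults are never used
def pvCell (board : List (List Int)) (r c : Int) : Int :=
  (PySem.List.pyGet? ((PySem.List.pyGet? board r).getD []) c).getD 0

-- ===== PORT A =====
def check_two_in_a_row (board : List (List Int)) (player : Int) : Bool :=
  -- rows loop (early `return True` on first hit = List.any)
  if (PySem.List.pyRange 0 3 1).any (fun row =>
      (pvCell board row 0 == pvCell board row 1 && pvCell board row 1 == player && pvCell board row 2 == 0) ||
      (pvCell board row 0 == pvCell board row 2 && pvCell board row 2 == player && pvCell board row 1 == 0) ||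
      (pvCell board row 1 == pvCell board row 2 && pvCell board row 2 == player && pvCell board row 0 == 0)) then true
  else if (PySem.List.pyRange 0 3 1).any (fun col =>
      (pvCell board 0 col == pvCell board 1 col && pvCell board 1 col == player && pvCell board 2 col == 0) ||
      (pvCell board 0 col == pvCell board 2 col && pvCell board 2 col == player && pvCell board 1 col == 0) ||
      (pvCell board 1 col == pvCell board 2 col && pvCell board 2 col == player && pvCell board 0 col == 0)) then true
  else if (pvCell board 0 0 == pvCell board 1 1 && pvCell board 1 1 == player && pvCell board 2 2 == 0) ||
          (pvCell board 0 0 == pvCell board 2 2 && pvCell board 2 2 == player && pvCell board 1 1 == 0) ||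
          (pvCell board 1 1 == pvCell board 2 2 && pvCell board 2 2 == player && pvCell board 0 0 == 0) then true
  else if (pvCell board 0 2 == pvCell board 1 1 && pvCell board 1 1 == player && pvCell board 2 0 == 0) ||
          (pvCell board 0 2 == pvCell board 2 0 && pvCell board 2 0 == player && pvCell board 1 1 == 0) ||
          (pvCell board 1 1 == pvCell board 2 0 && pvCell board 2 0 == player && pvCell board 0 2 == 0) then true
  else false

-- ===== PORT B =====
def check_two_in_a_row_alt (board : List (List Int)) (player : Int) : Bool :=
  -- the `continue` on a non-empty cell becomes the leading `!(… != 0) &&`,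
  -- the four early `return True` branches become the disjunction
  (PySem.List.pyRange 0 3 1).any (fun r =>
    (PySem.List.pyRange 0 3 1).any (fun c =>
      !(pvCell board r c != 0) &&
      ((pvCell board r (PySem.Int.mod (c + 1) 3) == player &&
        pvCell board r (PySem.Int.mod (c + 2) 3) == player) ||
       (pvCell board (PySem.Int.mod (r + 1) 3) c == player &&
        pvCell board (PySem.Int.mod (r + 2) 3) c == player) ||
       (r == c &&
        pvCell board (PySem.Int.mod (r + 1) 3) (PySem.Int.mod (c + 1) 3) == player &&
        pvCell board (PySem.Int.mod (r + 2) 3) (PySem.Int.mod (c + 2) 3) == player) ||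
       (r + c == 2 &&
        pvCell board (PySem.Int.mod (r + 1) 3) (PySem.Int.mod (c + 2) 3) == player &&
        pvCell board (PySem.Int.mod (r + 2) 3) (PySem.Int.mod (c + 1) 3) == player))))

-- ===== PRECONDITION & SPEC =====
-- Pre_ excludes boards smaller than 3x3: on those each Python raises IndexError unless an early
-- check returns True before the first missing cell is read, and the two programs read the cells
-- in different orders there (A line by line, B cell by cell), so their crash/return behaviour
-- on such malformed boards is an accident of traversal order.
def Pre_check_two_in_a_row (board : List (List Int)) (player : Int) : Prop :=
  3 ≤ board.length ∧ ∀ row ∈ board.take 3, 3 ≤ row.length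
instance (board : List (List Int)) (player : Int) : Decidable (Pre_check_two_in_a_row board player) := by
  unfold Pre_check_two_in_a_row; infer_instance

def pvWitness_check_two_in_a_row : List (List Int) × Int :=
  ([[1, 1, 0], [0, 2, 0], [2, 0, 2]], 1)

def Spec_check_two_in_a_row (board : List (List Int)) (player : Int) (out : Bool) : Prop := out = check_two_in_a_row_alt board player
instance (board : List (List Int)) (player : Int) (out : Bool) : Decidable (Spec_check_two_in_a_row board player out) := by unfold Spec_check_two_in_a_row; infer_instance

-- ===== CLAIM (what is proved, stated in full; the proofs are below) =====
def Claim_equal_check_two_in_a_row : Prop := ∀ (board : List (List Int)) (player : Int), Dom_check_two_in_a_row board player → Pre_check_two_in_a_row board player → Spec_check_two_in_a_row board player (check_two_in_a_row board player)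

-- ===== LEMMAS AND PROOFS =====

theorem pyRange03 : PySem.List.pyRange 0 3 1 = [0, 1, 2] := by decide

theorem m01 : PySem.Int.mod ((0:Int) + 1) 3 = 1 := by decide
theorem m02 : PySem.Int.mod ((0:Int) + 2) 3 = 2 := by decide
theorem m11 : PySem.Int.mod ((1:Int) + 1) 3 = 2 := by decide
theorem m12 : PySem.Int.mod ((1:Int) + 2) 3 = 0 := by decide
theorem m21 : PySem.Int.mod ((2:Int) + 1) 3 = 0 := by decide
theorem m22 : PySem.Int.mod ((2:Int) + 2) 3 = 1 := by decide

theorem tnn2 : Int.toNat 2 = 2 := by decide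

theorem e00 (x y z : Int) (t : List Int) (r1 r2 : List Int) (rest : List (List Int)) : pvCell ((x::y::z::t)::r1::r2::rest) 0 0 = x := by norm_num [pvCell, PySem.List.pyGet?_of_nonneg, tnn2]
theorem e01 (x y z : Int) (t : List Int) (r1 r2 : List Int) (rest : List (List Int)) : pvCell ((x::y::z::t)::r1::r2::rest) 0 1 = y := by norm_num [pvCell, PySem.List.pyGet?_of_nonneg, tnn2]
theorem e02 (x y z : Int) (t : List Int) (r1 r2 : List Int) (rest : List (List Int)) : pvCell ((x::y::z::t)::r1::r2::rest) 0 2 = z := by norm_num [pvCell, PySem.List.pyGet?_of_nonneg, tnn2]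
theorem e10 (x y z : Int) (t : List Int) (r0 r2 : List Int) (rest : List (List Int)) : pvCell (r0::(x::y::z::t)::r2::rest) 1 0 = x := by norm_num [pvCell, PySem.List.pyGet?_of_nonneg, tnn2]
theorem e11 (x y z : Int) (t : List Int) (r0 r2 : List Int) (rest : List (List Int)) : pvCell (r0::(x::y::z::t)::r2::rest) 1 1 = y := by norm_num [pvCell, PySem.List.pyGet?_of_nonneg, tnn2]
theorem e12 (x y z : Int) (t : List Int) (r0 r2 : List Int) (rest : List (List Int)) : pvCell (r0::(x::y::z::t)::r2::rest) 1 2 = z := by norm_num [pvCell, PySem.List.pyGet?_of_nonneg, tnn2]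
theorem e20 (x y z : Int) (t : List Int) (r0 r1 : List Int) (rest : List (List Int)) : pvCell (r0::r1::(x::y::z::t)::rest) 2 0 = x := by norm_num [pvCell, PySem.List.pyGet?_of_nonneg, tnn2]
theorem e21 (x y z : Int) (t : List Int) (r0 r1 : List Int) (rest : List (List Int)) : pvCell (r0::r1::(x::y::z::t)::rest) 2 1 = y := by norm_num [pvCell, PySem.List.pyGet?_of_nonneg, tnn2]
theorem e22 (x y z : Int) (t : List Int) (r0 r1 : List Int) (rest : List (List Int)) : pvCell (r0::r1::(x::y::z::t)::rest) 2 2 = z := by norm_num [pvCell, PySem.List.pyGet?_of_nonneg, tnn2]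

theorem nb (a b : Int) : (!(a != b)) = (a == b) := by simp [bne]

theorem lineB (x y z p : Int) :
    ((x == y && y == p && z == 0) || (x == z && z == p && y == 0) || (y == z && z == p && x == 0))
    = ((z == 0) && (x == p && y == p) || ((y == 0) && (x == p && z == p) || (x == 0) && (y == p && z == p))) := by
  rw [Bool.eq_iff_iff]; simp only [Bool.or_eq_true, Bool.and_eq_true, beq_iff_eq]; omega

theorem q00 : (((0:Int)) == 0) = true := by decide
theorem q01 : (((0:Int)) == 1) = false := by decide
theorem q02 : (((0:Int)) == 2) = false := by decide
theorem q10 : (((1:Int)) == 0) = false := by decide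
theorem q11 : (((1:Int)) == 1) = true := by decide
theorem q12 : (((1:Int)) == 2) = false := by decide
theorem q20 : (((2:Int)) == 0) = false := by decide
theorem q21 : (((2:Int)) == 1) = false := by decide
theorem q22 : (((2:Int)) == 2) = true := by decide
theorem s00 : (((0:Int)) + 0 == 2) = false := by decide
theorem s01 : (((0:Int)) + 1 == 2) = false := by decide
theorem s02 : (((0:Int)) + 2 == 2) = true := by decide
theorem s10 : (((1:Int)) + 0 == 2) = false := by decide
theorem s11 : (((1:Int)) + 1 == 2) = true := by decide
theorem s12 : (((1:Int)) + 2 == 2) = false := by decide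
theorem s20 : (((2:Int)) + 0 == 2) = true := by decide
theorem s21 : (((2:Int)) + 1 == 2) = false := by decide
theorem s22 : (((2:Int)) + 2 == 2) = false := by decide

-- ===== VERDICT (by name: the statement is the Claim_ definition above) =====
set_option maxHeartbeats 4000000 in
theorem check_two_in_a_row_spec : Claim_equal_check_two_in_a_row := by
  intro board player _ hpre
  obtain ⟨hlen, hrows⟩ := hpre
  obtain ⟨r0, r1, r2, rest, rfl⟩ : ∃ r0 r1 r2 rest, board = r0 :: r1 :: r2 :: rest := by
    match board, hlen with
    | r0 :: r1 :: r2 :: rest, _ => exact ⟨r0, r1, r2, rest, rfl⟩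
  have h0 := hrows r0 (by simp)
  have h1 := hrows r1 (by simp)
  have h2 := hrows r2 (by simp)
  obtain ⟨a0, a1, a2, ta, rfl⟩ : ∃ x y z t, r0 = x :: y :: z :: t := by
    match r0, h0 with | x :: y :: z :: t, _ => exact ⟨x, y, z, t, rfl⟩
  obtain ⟨b0, b1, b2, tb, rfl⟩ : ∃ x y z t, r1 = x :: y :: z :: t := by
    match r1, h1 with | x :: y :: z :: t, _ => exact ⟨x, y, z, t, rfl⟩
  obtain ⟨c0, c1, c2, tc, rfl⟩ : ∃ x y z t, r2 = x :: y :: z :: t := by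
    match r2, h2 with | x :: y :: z :: t, _ => exact ⟨x, y, z, t, rfl⟩
  unfold Spec_check_two_in_a_row check_two_in_a_row check_two_in_a_row_alt
  rw [pyRange03]
  simp only [List.any_cons, List.any_nil]
  simp only [m01, m02, m11, m12, m21, m22]
  simp only [e00, e01, e02, e10, e11, e12, e20, e21, e22]
  simp only [Bool.if_true_left, Bool.decide_coe]
  simp only [lineB, nb]
  simp only [q00, q01, q02, q10, q11, q12, q20, q21, q22,
             s00, s01, s02, s10, s11, s12, s20, s21, s22]
  simp only [Bool.false_and, Bool.true_and, Bool.or_false]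
  simp only [Bool.and_or_distrib_left]
  ac_rfl
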